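-- pv_equiv track=rewrite | github.com/SantiagoDLCB/IIC2233_Respaldo | SantiagoDLCB-iic2233-2023-1/Tareas/T0/functions.py | verificar_alcance_bomba
-- ===== SOURCE A (Python) =====
-- def verificar_alcance_bomba(tablero: list, coordenada: tuple) -> int:
--     celda = tablero[coordenada[0]][coordenada[1]]
--     if celda in 'T-':
--         return 0
--     observados = obtener_observables(tablero, coordenada)
--     observados_validos = []
--     for direccion in observados:
--         ciclo = True
--         for x1, y1 in direccion:
--             if tablero[x1][y1] != 'T' and ciclo:
--                 observados_validos.append((x1, y1))
--             else:
--                 ciclo = False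
--     return 1 + len(observados_validos)
--
-- def obtener_observables(tablero: list, coord: tuple):
--     x, y = coord
--     # se crean listas con las cordenadas de las celdas observadas
--     # por cada bomba en cada direccion hasta topar con paredes
--     arriba = [(indice, y) for indice in range(x)][::-1]
--     abajo = [(indice, y) for indice in range(x+1, len(tablero))]
--     izquierda = [(x, indice) for indice in range(y)][::-1]
--     derecha = [(x, indice) for indice in range(y+1, len(tablero))]
--     # conjunto de las celdas observadas
--     observados = [izquierda, derecha, arriba, abajo]
--     return observados
-- ===== SOURCE B (Python) =====
-- def _segmento(celdas: list, p: int) -> int: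
--     # nearest wall strictly left of p (lo) and strictly right of p (hi) in one scan
--     lo = -1
--     hi = len(celdas)
--     for i, c in enumerate(celdas):
--         if c == 'T':
--             if i < p:
--                 lo = i
--             elif i > p and i < hi:
--                 hi = i
--     # cells strictly between the two walls, minus the bomb cell itself
--     return hi - lo - 2
--
-- def verificar_alcance_bomba(tablero: list, coordenada: tuple) -> int:
--     x, y = coordenada
--     if tablero[x][y] in 'T-':
--         return 0
--     n = len(tablero)
--     fila = [tablero[x][j] for j in range(n)]
--     columna = [tablero[i][y] for i in range(n)]
--     return 1 + _segmento(fila, y) + _segmento(columna, x)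
-- ===== Notes on version B (the rewrite author's own statement) =====
-- stated objective: alternative
-- what changed: Instead of walking four direction rays with a latching flag, B extracts the bomb's row and column, finds in one scan per line the nearest wall strictly left and strictly right of the bomb, and returns 1 plus the arithmetic span (hi - lo - 2) of each line.
-- outside the precondition, e.g. on verificar_alcance_bomba([['a', 'b'], ['c', 'd']], (0, -2)): A returns 5, B returns 3; on verificar_alcance_bomba([['a', 'b', 'c', 'd', 'e']], (0, 3)): A returns 4, B returns 1
import Mathlib
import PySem

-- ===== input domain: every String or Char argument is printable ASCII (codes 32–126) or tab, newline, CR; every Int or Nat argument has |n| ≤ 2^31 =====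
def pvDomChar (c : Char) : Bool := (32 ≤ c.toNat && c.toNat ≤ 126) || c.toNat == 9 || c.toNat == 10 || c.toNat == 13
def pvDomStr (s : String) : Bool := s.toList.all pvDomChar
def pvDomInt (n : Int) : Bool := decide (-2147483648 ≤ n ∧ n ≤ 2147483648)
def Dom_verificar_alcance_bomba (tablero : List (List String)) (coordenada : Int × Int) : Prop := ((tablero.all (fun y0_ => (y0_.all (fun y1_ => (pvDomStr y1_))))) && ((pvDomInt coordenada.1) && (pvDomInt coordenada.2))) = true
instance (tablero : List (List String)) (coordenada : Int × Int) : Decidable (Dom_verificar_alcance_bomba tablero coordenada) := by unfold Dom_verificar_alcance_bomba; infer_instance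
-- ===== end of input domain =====

-- B replaces A's four direction-ray walks (prebuilt coordinate lists + latching 'ciclo' flag)
-- with nearest-wall scans of the bomb's row and column and the arithmetic span hi - lo - 2.


-- shared helper: tablero[i][j] (valid under Pre_, which keeps both indexings in range)
def pvCell (tablero : List (List String)) (i j : Int) : String :=
  PySem.List.pyGetD (PySem.List.pyGetD tablero i []) j ""

-- ===== PORT A =====
def obtener_observables (tablero : List (List String)) (coord : Int × Int) : List (List (Int × Int)) :=
  let x := coord.1
  let y := coord.2
  let arriba := ((PySem.List.pyRange 0 x 1).map (fun i => (i, y))).reverse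
  let abajo := (PySem.List.pyRange (x + 1) (tablero.length : Int) 1).map (fun i => (i, y))
  let izquierda := ((PySem.List.pyRange 0 y 1).map (fun i => (x, i))).reverse
  let derecha := (PySem.List.pyRange (y + 1) (tablero.length : Int) 1).map (fun i => (x, i))
  [izquierda, derecha, arriba, abajo]

def verificar_alcance_bomba (tablero : List (List String)) (coordenada : Int × Int) : Int :=
  let celda := pvCell tablero coordenada.1 coordenada.2
  if PySem.Str.isIn celda "T-" then 0
  else
    let observados := obtener_observables tablero coordenada
    let observados_validos := observados.foldl (fun acc direccion =>
      (direccion.foldl (fun (st : List (Int × Int) × Bool) p =>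
        if pvCell tablero p.1 p.2 ≠ "T" ∧ st.2 = true then (st.1 ++ [p], st.2)
        else (st.1, false)) (acc, true)).1) []
    1 + (observados_validos.length : Int)

-- ===== PORT B =====
-- loop body of _segmento: update (lo, hi) at cell (i, c)
def segStep (p : Int) (st : Int × Int) (ic : Int × String) : Int × Int :=
  if ic.2 = "T" then
    if ic.1 < p then (ic.1, st.2)
    else if p < ic.1 ∧ ic.1 < st.2 then (st.1, ic.1)
    else st
  else st

def segmento (celdas : List String) (p : Int) : Int :=
  let st := (PySem.List.enumerate celdas 0).foldl (segStep p) (-1, (celdas.length : Int))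
  st.2 - st.1 - 2

def verificar_alcance_bomba_alt (tablero : List (List String)) (coordenada : Int × Int) : Int :=
  let x := coordenada.1
  let y := coordenada.2
  if PySem.Str.isIn (pvCell tablero x y) "T-" then 0
  else
    let n : Int := (tablero.length : Int)
    let fila := (PySem.List.pyRange 0 n 1).map (fun j => pvCell tablero x j)
    let columna := (PySem.List.pyRange 0 n 1).map (fun i => pvCell tablero i y)
    1 + segmento fila y + segmento columna x

-- ===== PRECONDITION & SPEC =====
-- Pre_ admits any coordinate of an existing cell (Python-style negative indices included) whose cell
-- already answers 0, and otherwise requires a non-negative coordinate with column y present in every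
-- row, y < len(tablero), and row x reaching column len(tablero)-1 — outside that A's mix of
-- len(tablero) bounds and negative-index wraparound can raise IndexError or read wrapped/extra cells.
def Pre_verificar_alcance_bomba (tablero : List (List String)) (coordenada : Int × Int) : Prop :=
  -(tablero.length : Int) ≤ coordenada.1 ∧ coordenada.1 < (tablero.length : Int) ∧
  -((PySem.List.pyGetD tablero coordenada.1 []).length : Int) ≤ coordenada.2 ∧
  coordenada.2 < ((PySem.List.pyGetD tablero coordenada.1 []).length : Int) ∧
  (PySem.Str.isIn (pvCell tablero coordenada.1 coordenada.2) "T-" = true ∨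
    (0 ≤ coordenada.1 ∧ 0 ≤ coordenada.2 ∧ coordenada.2 < (tablero.length : Int) ∧
      (∀ r ∈ tablero, coordenada.2 < (r.length : Int)) ∧
      (tablero.length : Int) ≤ ((PySem.List.pyGetD tablero coordenada.1 []).length : Int)))
instance (tablero : List (List String)) (coordenada : Int × Int) : Decidable (Pre_verificar_alcance_bomba tablero coordenada) := by unfold Pre_verificar_alcance_bomba; infer_instance

def pvWitness_verificar_alcance_bomba : List (List String) × (Int × Int) := ([["B", "x"], ["x", "T"]], (0, 0))

def Spec_verificar_alcance_bomba (tablero : List (List String)) (coordenada : Int × Int) (out : Int) : Prop := out = verificar_alcance_bomba_alt tablero coordenada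
instance (tablero : List (List String)) (coordenada : Int × Int) (out : Int) : Decidable (Spec_verificar_alcance_bomba tablero coordenada out) := by unfold Spec_verificar_alcance_bomba; infer_instance

-- ===== CLAIM (what is proved, stated in full; the proofs are below) =====
def Claim_equal_verificar_alcance_bomba : Prop := ∀ (tablero : List (List String)) (coordenada : Int × Int), Dom_verificar_alcance_bomba tablero coordenada → Pre_verificar_alcance_bomba tablero coordenada → Spec_verificar_alcance_bomba tablero coordenada (verificar_alcance_bomba tablero coordenada)

-- ===== LEMMAS AND PROOFS =====

-- prefix of a coordinate list before the first 'T' cell (what A's latching flag collects)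
def pvTake (tablero : List (List String)) : List (Int × Int) → List (Int × Int)
  | [] => []
  | p :: rest => if pvCell tablero p.1 p.2 ≠ "T" then p :: pvTake tablero rest else []

-- length (as Int) of the non-'T' prefix of a list of cells
def twLen (celdas : List String) : Int := ((celdas.takeWhile (fun c => c ≠ "T")).length : Int)

-- position of the last 'T' (what the lo accumulator computes)
def loAux : List String → Int → Int → Int
  | [], _, a => a
  | c :: r, k, a => loAux r (k + 1) (if c = "T" then k else a)

-- position of the first 'T', default b (what the hi accumulator computes)
def hiAux : List String → Int → Int → Int
  | [], _, b => b
  | c :: r, k, b => if c = "T" then k else hiAux r (k + 1) b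

lemma pvFoldl_false (tablero : List (List String)) (l : List (Int × Int)) (acc : List (Int × Int)) :
    l.foldl (fun (st : List (Int × Int) × Bool) p =>
      if pvCell tablero p.1 p.2 ≠ "T" ∧ st.2 = true then (st.1 ++ [p], st.2)
      else (st.1, false)) (acc, false) = (acc, false) := by
  induction l with
  | nil => rfl
  | cons p rest ih => simp [List.foldl_cons, ih]

lemma pvFoldl_true (tablero : List (List String)) (l : List (Int × Int)) (acc : List (Int × Int)) :
    (l.foldl (fun (st : List (Int × Int) × Bool) p =>
      if pvCell tablero p.1 p.2 ≠ "T" ∧ st.2 = true then (st.1 ++ [p], st.2)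
      else (st.1, false)) (acc, true)).1 = acc ++ pvTake tablero l := by
  induction l generalizing acc with
  | nil => simp [pvTake]
  | cons p rest ih =>
    by_cases hT : pvCell tablero p.1 p.2 = "T"
    · simp [List.foldl_cons, pvTake, hT, pvFoldl_false]
    · simp [List.foldl_cons, pvTake, hT, ih]

lemma pvTake_len (tablero : List (List String)) (l : List (Int × Int)) :
    ((pvTake tablero l).length : Int) = twLen (l.map (fun q => pvCell tablero q.1 q.2)) := by
  induction l with
  | nil => simp [pvTake, twLen]
  | cons q rest ih =>
    by_cases hT : pvCell tablero q.1 q.2 = "T"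
    · simp [pvTake, twLen, hT]
    · simp [pvTake, twLen, hT] at ih ⊢; omega

lemma loAux_concat (cells : List String) (c : String) :
    ∀ (k a : Int), loAux (cells ++ [c]) k a = if c = "T" then k + cells.length else loAux cells k a := by
  induction cells with
  | nil => intro k a; by_cases h : c = "T" <;> simp [loAux, h]
  | cons d r ih =>
    intro k a
    simp only [List.cons_append, loAux, ih, List.length_cons]
    by_cases h : c = "T" <;> simp [h] <;> push_cast <;> ring

lemma loAux_spec (cells : List String) : ∀ (k : Int),
    loAux cells k (k - 1) = k + cells.length - 1 - twLen cells.reverse := by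
  induction cells using List.reverseRecOn with
  | nil => intro k; simp [loAux, twLen]
  | append_singleton cells c ih =>
    intro k
    rw [loAux_concat]
    by_cases h : c = "T"
    · rw [if_pos h]
      have ht : List.takeWhile (fun c => decide (c ≠ "T")) (c :: cells.reverse) = [] := by
        simp [h]
      simp only [List.reverse_append, List.reverse_singleton, List.singleton_append, twLen, ht,
        List.length_nil, List.length_append, List.length_singleton]
      push_cast; ring
    · rw [if_neg h, ih k]
      have ht : List.takeWhile (fun c => decide (c ≠ "T")) (c :: cells.reverse) =
          c :: List.takeWhile (fun c => decide (c ≠ "T")) cells.reverse := by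
        simp [List.takeWhile_cons, h]
      simp only [List.reverse_append, List.reverse_singleton, List.singleton_append, twLen, ht,
        List.length_cons, List.length_append, List.length_singleton, List.length_nil]
      omega

lemma hiAux_spec (cells : List String) : ∀ (k : Int),
    hiAux cells k (k + cells.length) = k + twLen cells := by
  induction cells with
  | nil => intro k; simp [hiAux, twLen]
  | cons c r ih =>
    intro k
    by_cases h : c = "T"
    · have ht : List.takeWhile (fun c => decide (c ≠ "T")) (c :: r) = [] := by simp [h]
      simp only [hiAux, if_pos h, twLen, ht, List.length_nil]
      simp
    · simp only [hiAux, if_neg h, List.length_cons]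
      rw [show k + (((r.length + 1 : Nat)) : Int) = (k + 1) + (r.length : Int) by push_cast; ring,
        ih (k + 1)]
      have htw : twLen (c :: r) = 1 + twLen r := by
        have ht : List.takeWhile (fun c => decide (c ≠ "T")) (c :: r) =
            c :: List.takeWhile (fun c => decide (c ≠ "T")) r := by
          simp [List.takeWhile_cons, h]
        simp only [twLen, ht, List.length_cons]
        push_cast; ring
      rw [htw]; ring

lemma fold_frozen (p : Int) (cells : List String) : ∀ (k : Int) (st : Int × Int),
    p < k → st.2 ≤ k → (PySem.List.enumerate cells k).foldl (segStep p) st = st := by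
  induction cells with
  | nil => intro k st _ _; simp [PySem.List.enumerate_nil]
  | cons c r ih =>
    intro k st hp h2
    rw [PySem.List.enumerate_cons, List.foldl_cons]
    have hstep : segStep p st (k, c) = st := by
      unfold segStep
      by_cases h : c = "T"
      · rw [if_pos h, if_neg (show ¬ ((k, c).1 < p) by simp; omega),
          if_neg (show ¬ (p < (k, c).1 ∧ (k, c).1 < st.2) by rintro ⟨-, h2⟩; simp at h2; omega)]
      · rw [if_neg (by simpa using h)]
    rw [hstep]
    exact ih (k + 1) st (by omega) (by omega)

lemma fold_lo (p : Int) (cells : List String) : ∀ (k : Int) (st : Int × Int),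
    k + (cells.length : Int) ≤ p →
    (PySem.List.enumerate cells k).foldl (segStep p) st = (loAux cells k st.1, st.2) := by
  induction cells with
  | nil => intro k st _; simp [PySem.List.enumerate_nil, loAux]
  | cons c r ih =>
    intro k st hle
    rw [PySem.List.enumerate_cons, List.foldl_cons]
    have hk : k < p := by simp only [List.length_cons] at hle; push_cast at hle; omega
    have hlen : k + 1 + (r.length : Int) ≤ p := by
      simp only [List.length_cons] at hle; push_cast at hle; omega
    by_cases h : c = "T"
    · have hstep : segStep p st (k, c) = (k, st.2) := by simp [segStep, h, hk]
      rw [hstep, ih (k + 1) (k, st.2) hlen]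
      simp [loAux, h]
    · have hstep : segStep p st (k, c) = st := by simp [segStep, h]
      rw [hstep, ih (k + 1) st hlen]
      simp [loAux, h]

lemma fold_hi (p : Int) (cells : List String) : ∀ (k : Int) (st : Int × Int),
    p < k → k + (cells.length : Int) ≤ st.2 →
    (PySem.List.enumerate cells k).foldl (segStep p) st = (st.1, hiAux cells k st.2) := by
  induction cells with
  | nil => intro k st _ _; simp [PySem.List.enumerate_nil, hiAux]
  | cons c r ih =>
    intro k st hp hle
    rw [PySem.List.enumerate_cons, List.foldl_cons]
    have hk2 : k < st.2 := by simp only [List.length_cons] at hle; push_cast at hle; omega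
    by_cases h : c = "T"
    · have hstep : segStep p st (k, c) = (st.1, k) := by
        simp [segStep, h, show ¬ k < p from by omega, hp, hk2]
      rw [hstep, fold_frozen p r (k + 1) (st.1, k) (by omega) (by simp)]
      simp [hiAux, h]
    · have hstep : segStep p st (k, c) = st := by simp [segStep, h]
      have hlen : k + 1 + (r.length : Int) ≤ st.2 := by
        simp only [List.length_cons] at hle; push_cast at hle; omega
      rw [hstep, ih (k + 1) st (by omega) hlen]
      simp [hiAux, h]

-- the core: segmento of a full line = count left of p before a wall + count right of p before a wall
lemma segmento_axis (g : Int → String) (p n : Int) (hp0 : 0 ≤ p) (hpn : p < n) :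
    segmento ((PySem.List.pyRange 0 n 1).map g) p =
      twLen (((PySem.List.pyRange 0 p 1).map g).reverse) +
      twLen ((PySem.List.pyRange (p + 1) n 1).map g) := by
  have hsplit : PySem.List.pyRange 0 n 1 =
      PySem.List.pyRange 0 p 1 ++ (p :: PySem.List.pyRange (p + 1) n 1) := by
    rw [PySem.List.pyRange_one_append 0 p n hp0 (by omega),
      PySem.List.pyRange_one_cons (show p < n from hpn)]
  set l1 := (PySem.List.pyRange 0 p 1).map g with hl1
  set l2 := (PySem.List.pyRange (p + 1) n 1).map g with hl2
  have hlen1 : (l1.length : Int) = p := by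
    simp [hl1, PySem.List.length_pyRange_one]; omega
  have hlen2 : (l2.length : Int) = n - (p + 1) := by
    simp [hl2, PySem.List.length_pyRange_one]; omega
  have hcells : (PySem.List.pyRange 0 n 1).map g = l1 ++ (g p :: l2) := by
    rw [hsplit, List.map_append, List.map_cons]
  have hlenall : (((PySem.List.pyRange 0 n 1).map g).length : Int) = n := by
    rw [hcells]
    simp only [List.length_append, List.length_cons]
    push_cast
    omega
  unfold segmento
  rw [hlenall, hcells, PySem.List.enumerate_append, List.foldl_append,
    PySem.List.enumerate_cons, List.foldl_cons]
  rw [fold_lo p l1 0 (-1, n) (by omega)]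
  have hmid : segStep p (loAux l1 0 (-1), n) ((0 : Int) + (l1.length : Int), g p) = (loAux l1 0 (-1), n) := by
    unfold segStep
    by_cases h : g p = "T" <;> simp [h, hlen1] <;> intros <;> omega
  rw [hmid]
  rw [show (0 : Int) + (l1.length : Int) + 1 = p + 1 by omega]
  rw [fold_hi p l2 (p + 1) (loAux l1 0 (-1), n) (by omega) (by omega)]
  have hlo : loAux l1 0 (-1) = p - 1 - twLen l1.reverse := by
    have := loAux_spec l1 0
    simpa [hlen1] using this
  have hhi : hiAux l2 (p + 1) n = p + 1 + twLen l2 := by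
    have := hiAux_spec l2 (p + 1)
    rw [show (p + 1) + (l2.length : Int) = n by omega] at this
    exact this
  simp only [hlo, hhi]
  ring

lemma pv_main (tablero : List (List String)) (x y : Int)
    (hx0 : 0 ≤ x) (hxn : x < (tablero.length : Int))
    (hy0 : 0 ≤ y) (hyn : y < (tablero.length : Int)) :
    verificar_alcance_bomba tablero (x, y) = verificar_alcance_bomba_alt tablero (x, y) := by
  unfold verificar_alcance_bomba verificar_alcance_bomba_alt obtener_observables
  by_cases hT : PySem.Str.isIn (pvCell tablero x y) "T-" = true
  · rw [if_pos hT, if_pos hT]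
  · rw [if_neg hT, if_neg hT]
    simp only [List.foldl_cons, List.foldl_nil]
    rw [pvFoldl_true, pvFoldl_true, pvFoldl_true, pvFoldl_true]
    simp only [List.nil_append, List.length_append]
    push_cast
    have hrow := segmento_axis (fun j => pvCell tablero x j) y (tablero.length : Int) hy0 hyn
    have hcol := segmento_axis (fun i => pvCell tablero i y) x (tablero.length : Int) hx0 hxn
    rw [hrow, hcol]
    rw [pvTake_len, pvTake_len, pvTake_len, pvTake_len]
    simp only [List.map_reverse, List.map_map]
    simp only [List.map_reverse, List.map_map, Function.comp_def]
    ring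

-- ===== VERDICT (by name: the statement is the Claim_ definition above) =====
theorem verificar_alcance_bomba_spec : Claim_equal_verificar_alcance_bomba := by
  intro tablero coordenada hDom hPre
  obtain ⟨x, y⟩ := coordenada
  obtain ⟨hx0, hxn, hy0, hyR, hsq⟩ := hPre
  unfold Spec_verificar_alcance_bomba
  dsimp only at hx0 hxn hy0 hyR hsq
  rcases hsq with hT | hsq
  · show verificar_alcance_bomba _ _ = _
    rw [verificar_alcance_bomba, verificar_alcance_bomba_alt]
    rw [if_pos hT, if_pos hT]
  · obtain ⟨hx0', hy0', hyn, _, _⟩ := hsq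
    exact pv_main tablero x y hx0' hxn hy0' hyn
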